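-- pv_equiv track=rewrite | github.com/doporg/dop | defect-location-server/algorithm/src/defect_features/Corpus.py | fenci
-- ===== SOURCE A (Python) =====
-- def fenci(data):
--     finallist = []
--     fencinum = 0
--     for te in data:
--         temp = []
--         left = 0
--         right = 0
--         while (left < len(te)):
--             if (te[left].isalpha()):
--                 right = left + 1
--                 while (right < len(te) and (te[right].isalpha() or te[right].isdigit() or te[right] == '_')):
--                     right = right + 1
--                 a = te[left:right]
--                 left = right
--                 temp.append(a)
--                 fencinum = fencinum + 1
--             elif (te[left].isdigit()):
--                 right = left + 1
--                 while (right < len(te) and te[right].isdigit()):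
--                     right = right + 1
--                 a = te[left:right]
--                 left = right
--                 temp.append(a)
--                 fencinum = fencinum + 1
--             elif (te[left] == ',' or te[left] == '.' or te[left] == '_' or te[left] == '(' or te[left] == ')'
--                   or te[left] == '{' or te[left] == '}' or te[left] == '=' or te[left] == '[' or te[left] == ']'
--                   or te[left] == '>' or te[left] == '<' or te[left] == '+' or te[left] == '-' or te[left] == '*'
--                   or te[left] == '/' or te[left] == '!' or te[left] == '@' or te[left] == '#' or te[left] == '%'
--                   or te[left] == '$' or te[left] == '|' or te[left] == ';' or te[left] == ':' or te[left] == '?'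
--             ):
--                 temp.append(te[left])
--                 fencinum = fencinum + 1
--                 left = left + 1
--             else:
--                 left = left + 1
--
--         finallist.append(temp)
--
--     return finallist, fencinum
-- ===== SOURCE B (Python) =====
-- PUNCT = set(",._(){}=[]><+-*/!@#%$|;:?")
--
-- def fenci(data):
--     finallist = []
--     fencinum = 0
--     for te in data:
--         toks = []
--         buf = []
--         state = None  # None, 'A' (identifier) or 'N' (number)
--         for ch in te:
--             if (state == 'A' and (ch.isalpha() or ch.isdigit() or ch == '_')) \
--                or (state == 'N' and ch.isdigit()):
--                 buf.append(ch)
--                 continue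
--             if buf:
--                 toks.append(''.join(buf))
--                 fencinum += 1
--                 buf = []
--             state = None
--             if ch.isalpha():
--                 state = 'A'
--                 buf.append(ch)
--             elif ch.isdigit():
--                 state = 'N'
--                 buf.append(ch)
--             elif ch in PUNCT:
--                 toks.append(ch)
--                 fencinum += 1
--         if buf:
--             toks.append(''.join(buf))
--             fencinum += 1
--         finallist.append(toks)
--     return finallist, fencinum
-- ===== Notes on version B (the rewrite author's own statement) =====
-- stated objective: alternative
-- what changed: A's two-index lookahead (inner while loops re-scanning ahead for each token) is replaced by a single left-to-right pass per string with a buffer and a state flag in {none, ALPHA, NUM} that flushes tokens at boundaries.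
import Mathlib
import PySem

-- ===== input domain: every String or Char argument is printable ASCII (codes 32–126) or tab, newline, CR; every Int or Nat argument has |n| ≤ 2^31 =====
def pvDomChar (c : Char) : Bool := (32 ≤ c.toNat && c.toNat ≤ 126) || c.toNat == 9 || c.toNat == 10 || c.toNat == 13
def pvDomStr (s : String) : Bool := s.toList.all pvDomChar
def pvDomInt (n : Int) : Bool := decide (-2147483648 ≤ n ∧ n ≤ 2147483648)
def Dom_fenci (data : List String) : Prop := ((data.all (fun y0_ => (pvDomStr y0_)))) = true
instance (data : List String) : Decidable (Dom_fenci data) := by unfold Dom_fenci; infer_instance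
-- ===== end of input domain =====

-- B replaces A's two-index lookahead scanning with a single-pass buffer/state machine; objective: alternative decomposition.
-- (isalpha/isdigit are ported as Char.isAlpha/isDigit, exact on the printable-ASCII domain.)

-- ===== PORT A =====
-- the or-chain of punctuation characters, in A's order
def fenciPunct : List Char :=
  [',', '.', '_', '(', ')', '{', '}', '=', '[', ']', '>', '<', '+', '-', '*',
   '/', '!', '@', '#', '%', '$', '|', ';', ':', '?']

-- continuation test of A's first inner while
def fenciContWord (c : Char) : Bool := c.isAlpha || c.isDigit || c == '_'

-- A's inner 'while right < len(te) and p(te[right])' scan: collected run and remaining chars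
def fenciA_run (p : Char → Bool) : List Char → List Char × List Char
  | [] => ([], [])
  | c :: cs =>
    if p c then
      let t := fenciA_run p cs
      (c :: t.1, t.2)
    else ([], c :: cs)

theorem fenciA_run_len (p : Char → Bool) (cs : List Char) :
    (fenciA_run p cs).2.length ≤ cs.length := by
  induction cs with
  | nil => simp [fenciA_run]
  | cons c cs ih =>
    by_cases h : p c = true
    · simp only [fenciA_run, h, if_true, List.length_cons]
      omega
    · simp [fenciA_run, h]

-- A's outer while over one string: temp, fencinum threaded as accumulators
def fenciA_loop : List Char → List String → Int → List String × Int
  | [], temp, n => (temp, n)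
  | c :: cs, temp, n =>
    if c.isAlpha then
      let t := fenciA_run fenciContWord cs
      fenciA_loop t.2 (temp ++ [String.ofList (c :: t.1)]) (n + 1)
    else if c.isDigit then
      let t := fenciA_run (fun x => x.isDigit) cs
      fenciA_loop t.2 (temp ++ [String.ofList (c :: t.1)]) (n + 1)
    else if c ∈ fenciPunct then
      fenciA_loop cs (temp ++ [String.ofList [c]]) (n + 1)
    else
      fenciA_loop cs temp n
termination_by cs => cs.length
decreasing_by
  · exact Nat.lt_succ_of_le (fenciA_run_len fenciContWord cs)
  · exact Nat.lt_succ_of_le (fenciA_run_len (fun x => x.isDigit) cs)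
  · exact Nat.lt_succ_self _
  · exact Nat.lt_succ_self _

def fenci (data : List String) : List (List String) × Int :=
  data.foldl
    (fun acc te =>
      let r := fenciA_loop te.toList [] acc.2
      (acc.1 ++ [r.1], r.2))
    ([], 0)

-- ===== PORT B =====
-- PUNCT = set(",._(){}=[]><+-*/!@#%$|;:?")
def fenciPunctB : List Char := PySem.Set.ofList ",._(){}=[]><+-*/!@#%$|;:?".toList

inductive FState where
  | idle
  | word
  | num
deriving DecidableEq

-- the buffer-continuation test: state 'A' absorbs alpha/digit/'_', state 'N' absorbs digits
def fenciContB (st : FState) (c : Char) : Bool :=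
  match st with
  | .word => c.isAlpha || c.isDigit || c == '_'
  | .num => c.isDigit
  | .idle => false

-- one character of B's state machine: (toks, buf, state, count)
def fenciB_step (s : List String × List Char × FState × Int) (c : Char) :
    List String × List Char × FState × Int :=
  match s with
  | (toks, buf, st, n) =>
    if fenciContB st c then (toks, buf ++ [c], st, n)
    else
      let toks' := if buf ≠ [] then toks ++ [String.ofList buf] else toks
      let n' := if buf ≠ [] then n + 1 else n
      if c.isAlpha then (toks', [c], FState.word, n')
      else if c.isDigit then (toks', [c], FState.num, n')
      else if c ∈ fenciPunctB then (toks' ++ [String.ofList [c]], [], FState.idle, n' + 1)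
      else (toks', [], FState.idle, n')

-- final flush of a pending buffer
def fenciB_flush (s : List String × List Char × FState × Int) : List String × Int :=
  match s with
  | (toks, buf, _, n) => if buf ≠ [] then (toks ++ [String.ofList buf], n + 1) else (toks, n)

def fenciB_line (cs : List Char) (n : Int) : List String × Int :=
  fenciB_flush (cs.foldl fenciB_step ([], [], FState.idle, n))

def fenci_alt (data : List String) : List (List String) × Int :=
  data.foldl
    (fun acc te =>
      let r := fenciB_line te.toList acc.2
      (acc.1 ++ [r.1], r.2))
    ([], 0)

-- ===== PRECONDITION & SPEC =====
def Spec_fenci (data : List String) (out : List (List String) × Int) : Prop := out = fenci_alt data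
instance (data : List String) (out : List (List String) × Int) : Decidable (Spec_fenci data out) := by unfold Spec_fenci; infer_instance

-- ===== CLAIM (what is proved, stated in full; the proofs are below) =====
def Claim_equal_fenci : Prop := ∀ (data : List String), Dom_fenci data → Spec_fenci data (fenci data)

-- ===== LEMMAS AND PROOFS =====

theorem fenciPunctB_eq : fenciPunctB = fenciPunct := by decide

theorem fenciA_run_rest_head (p : Char → Bool) (cs : List Char) (c' : Char) (rest' : List Char) :
    (fenciA_run p cs).2 = c' :: rest' → p c' = false := by
  induction cs with
  | nil => simp [fenciA_run]
  | cons c cs ih =>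
    by_cases h : p c = true
    · simpa [fenciA_run, h] using ih
    · simp only [fenciA_run, h, Bool.false_eq_true, if_false]
      intro he
      obtain ⟨rfl, rfl⟩ := List.cons.injEq .. ▸ he
      simpa using h

-- a step whose continuation test fails first flushes the buffer, then acts as from the idle state
theorem fenciB_step_flush (toks : List String) (buf : List Char) (st : FState) (n : Int)
    (c : Char) (h : fenciContB st c = false) :
    fenciB_step (toks, buf, st, n) c =
      fenciB_step ((if buf ≠ [] then toks ++ [String.ofList buf] else toks), [], FState.idle,
        (if buf ≠ [] then n + 1 else n)) c := by
  have hidle : fenciContB FState.idle c = false := rfl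
  simp only [fenciB_step, h, hidle, Bool.false_eq_true, if_false]
  simp

-- the fold over a continuing run just accumulates the run into the buffer
theorem foldl_run (p : Char → Bool) (st : FState) (hp : ∀ c, fenciContB st c = p c) :
    ∀ (cs : List Char) (toks : List String) (buf : List Char) (n : Int),
      cs.foldl fenciB_step (toks, buf, st, n) =
        (fenciA_run p cs).2.foldl fenciB_step (toks, buf ++ (fenciA_run p cs).1, st, n) := by
  intro cs
  induction cs with
  | nil => simp [fenciA_run]
  | cons c cs ih =>
    intro toks buf n
    by_cases h : p c = true
    · have hstep : fenciB_step (toks, buf, st, n) c = (toks, buf ++ [c], st, n) := by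
        simp [fenciB_step, hp c, h]
      rw [List.foldl_cons, hstep, ih]
      simp [fenciA_run, h]
    · simp [fenciA_run, h]

-- main per-string lemma, by fuel induction on the length of the remaining chars
theorem AB_loop : ∀ (k : Nat) (cs : List Char), cs.length ≤ k → ∀ (toks : List String) (n : Int),
    fenciA_loop cs toks n = fenciB_flush (cs.foldl fenciB_step (toks, [], FState.idle, n)) := by
  intro k
  induction k with
  | zero =>
    intro cs hcs toks n
    have : cs = [] := List.eq_nil_of_length_eq_zero (Nat.le_zero.mp hcs)
    subst this
    simp [fenciA_loop, fenciB_flush]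
  | succ k ih =>
    intro cs hcs toks n
    match cs with
    | [] => simp [fenciA_loop, fenciB_flush]
    | c :: cs =>
      have hlen : cs.length ≤ k := by simpa using hcs
      by_cases hca : c.isAlpha = true
      · -- alpha run
        have hfirst : fenciB_step (toks, [], FState.idle, n) c = (toks, [c], FState.word, n) := by
          simp [fenciB_step, fenciContB, hca]
        rw [List.foldl_cons, hfirst,
          foldl_run fenciContWord FState.word (fun _ => rfl) cs toks [c] n]
        have hrl := fenciA_run_len fenciContWord cs
        rcases hrest : (fenciA_run fenciContWord cs).2 with _ | ⟨c', rest'⟩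
        · simp only [List.foldl_nil]
          simp [fenciA_loop, hca, hrest, fenciB_flush]
        · have hpc' : fenciContB FState.word c' = false := fenciA_run_rest_head _ _ _ _ hrest
          have hstep := fenciB_step_flush toks ([c] ++ (fenciA_run fenciContWord cs).1)
            FState.word n c' hpc'
          simp only [ne_eq, List.cons_ne_nil, not_false_eq_true, if_true,
            List.cons_append, List.nil_append] at hstep
          simp only [List.singleton_append]
          rw [List.foldl_cons, hstep, ← List.foldl_cons]
          have hlen' : (c' :: rest').length ≤ k := by
            rw [← hrest]; omega
          rw [← ih _ hlen']
          simp [fenciA_loop, hca, hrest]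
      · by_cases hcd : c.isDigit = true
        · -- digit run
          have hfirst : fenciB_step (toks, [], FState.idle, n) c = (toks, [c], FState.num, n) := by
            simp [fenciB_step, fenciContB, hca, hcd]
          rw [List.foldl_cons, hfirst,
            foldl_run (fun x => x.isDigit) FState.num (fun _ => rfl) cs toks [c] n]
          have hrl := fenciA_run_len (fun x => x.isDigit) cs
          rcases hrest : (fenciA_run (fun x => x.isDigit) cs).2 with _ | ⟨c', rest'⟩
          · simp only [List.foldl_nil]
            simp [fenciA_loop, hca, hcd, hrest, fenciB_flush]
          · have hpc' : fenciContB FState.num c' = false := fenciA_run_rest_head _ _ _ _ hrest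
            have hstep := fenciB_step_flush toks ([c] ++ (fenciA_run (fun x => x.isDigit) cs).1)
              FState.num n c' hpc'
            simp only [ne_eq, List.cons_ne_nil, not_false_eq_true, if_true,
              List.cons_append, List.nil_append] at hstep
            simp only [List.singleton_append]
            rw [List.foldl_cons, hstep, ← List.foldl_cons]
            have hlen' : (c' :: rest').length ≤ k := by
              rw [← hrest]; omega
            rw [← ih _ hlen']
            simp [fenciA_loop, hca, hcd, hrest]
        · by_cases hcp : c ∈ fenciPunct
          · -- punctuation
            have hfirst : fenciB_step (toks, [], FState.idle, n) c
                = (toks ++ [String.ofList [c]], [], FState.idle, n + 1) := by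
              simp [fenciB_step, fenciContB, hca, hcd, fenciPunctB_eq, hcp]
            rw [List.foldl_cons, hfirst, ← ih _ hlen]
            simp [fenciA_loop, hca, hcd, hcp]
          · -- ignored character
            have hfirst : fenciB_step (toks, [], FState.idle, n) c
                = (toks, [], FState.idle, n) := by
              simp [fenciB_step, fenciContB, hca, hcd, fenciPunctB_eq, hcp]
            rw [List.foldl_cons, hfirst, ← ih _ hlen]
            simp [fenciA_loop, hca, hcd, hcp]

theorem line_eq (cs : List Char) (n : Int) : fenciA_loop cs [] n = fenciB_line cs n :=
  AB_loop cs.length cs le_rfl [] n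

-- ===== VERDICT (by name: the statement is the Claim_ definition above) =====
theorem fenci_spec : Claim_equal_fenci := by
  intro data _
  unfold Spec_fenci fenci fenci_alt
  congr 1
  funext acc te
  simp only [line_eq]
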